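-- pv_equiv track=rewrite | github.com/luke-gregor/vindta_reCAlk | vindta_reCAlk/app.py | correct_date_fmt
-- ===== SOURCE A (Python) =====
-- def correct_date_fmt(date_fmt_str):
--
--     repl = [
--         ['dd', '%d'],
--         ['mm', '%m'],
--         ['yyyy', '%Y'],
--         ['yy', '%y'],
--         ['HH', '%H'],
--         ['MM', '%M']
--     ]
--
--     for a, b in repl:
--         date_fmt_str = date_fmt_str.replace(a, b)
--
--     return date_fmt_str
-- ===== SOURCE B (Python) =====
-- # One left-to-right scan replacing tokens (yyyy tried before yy), instead of six full-string replace passes.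
-- def correct_date_fmt(date_fmt_str):
--     s = date_fmt_str
--     out = []
--     i = 0
--     n = len(s)
--     while i < n:
--         if s[i:i + 4] == 'yyyy':
--             out.append('%Y'); i += 4
--         elif s[i:i + 2] == 'dd':
--             out.append('%d'); i += 2
--         elif s[i:i + 2] == 'mm':
--             out.append('%m'); i += 2
--         elif s[i:i + 2] == 'yy':
--             out.append('%y'); i += 2
--         elif s[i:i + 2] == 'HH':
--             out.append('%H'); i += 2
--         elif s[i:i + 2] == 'MM':
--             out.append('%M'); i += 2
--         else:
--             out.append(s[i]); i += 1
--     return ''.join(out)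
-- ===== Notes on version B (the rewrite author's own statement) =====
-- stated objective: alternative
-- what changed: B replaces A's six sequential full-string .replace passes with a single left-to-right scan that at each position matches one of the six tokens (yyyy before yy) and emits its strftime code, building the output once.
import Mathlib
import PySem

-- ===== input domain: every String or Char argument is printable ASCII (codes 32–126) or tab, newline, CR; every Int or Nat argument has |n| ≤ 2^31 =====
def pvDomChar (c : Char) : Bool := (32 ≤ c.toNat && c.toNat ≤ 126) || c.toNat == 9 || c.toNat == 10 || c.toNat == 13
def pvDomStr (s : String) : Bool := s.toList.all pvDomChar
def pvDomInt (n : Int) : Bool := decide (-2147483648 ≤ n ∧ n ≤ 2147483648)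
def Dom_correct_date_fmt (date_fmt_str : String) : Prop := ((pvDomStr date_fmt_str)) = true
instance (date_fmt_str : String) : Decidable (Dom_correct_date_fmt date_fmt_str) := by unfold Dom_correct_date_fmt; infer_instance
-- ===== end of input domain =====

-- B replaces A's six sequential full-string replace passes with one left-to-right token scan; same output, alternative structure (proved equal on all strings).

-- ===== PORT A =====
-- Literal port of A: the repl table, then one str.replace pass per pair, in order.
def correct_date_fmt (date_fmt_str : String) : String :=
  let repl : List (String × String) :=
    [("dd", "%d"), ("mm", "%m"), ("yyyy", "%Y"), ("yy", "%y"), ("HH", "%H"), ("MM", "%M")]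
  repl.foldl (fun s ab => PySem.Str.replace s ab.1 ab.2) date_fmt_str

-- ===== PORT B =====
-- Port of Source B's single scan: the while loop over index i becomes structural recursion on the
-- remaining suffix; the slice comparisons s[i:i+4] / s[i:i+2] become List.take on that suffix,
-- tried in Source B's if/elif order; ''.join(out) is the concatenation the recursion builds.
def tokChars : List Char → List Char
  | [] => []
  | c :: t =>
    if (c :: t).take 4 = ['y','y','y','y'] then '%' :: 'Y' :: tokChars (t.drop 3)
    else if (c :: t).take 2 = ['d','d'] then '%' :: 'd' :: tokChars (t.drop 1)
    else if (c :: t).take 2 = ['m','m'] then '%' :: 'm' :: tokChars (t.drop 1)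
    else if (c :: t).take 2 = ['y','y'] then '%' :: 'y' :: tokChars (t.drop 1)
    else if (c :: t).take 2 = ['H','H'] then '%' :: 'H' :: tokChars (t.drop 1)
    else if (c :: t).take 2 = ['M','M'] then '%' :: 'M' :: tokChars (t.drop 1)
    else c :: tokChars t
termination_by l => l.length
decreasing_by all_goals simp [List.length_drop]


def correct_date_fmt_alt (date_fmt_str : String) : String :=
  String.ofList (tokChars date_fmt_str.toList)

-- ===== PRECONDITION & SPEC =====
def Spec_correct_date_fmt (date_fmt_str : String) (out : String) : Prop := out = correct_date_fmt_alt date_fmt_str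
instance (date_fmt_str : String) (out : String) : Decidable (Spec_correct_date_fmt date_fmt_str out) := by unfold Spec_correct_date_fmt; infer_instance

-- ===== CLAIM (what is proved, stated in full; the proofs are below) =====
def Claim_equal_correct_date_fmt : Prop := ∀ (date_fmt_str : String), Dom_correct_date_fmt date_fmt_str → Spec_correct_date_fmt date_fmt_str (correct_date_fmt date_fmt_str)

-- ===== LEMMAS AND PROOFS =====

theorem go_spec (p np : List Char) (hp : p ≠ []) :
    ∀ fuel l acc, l.length ≤ fuel →
      PySem.Chars.replace.go p np fuel l acc = acc.reverse ++ PySem.Chars.replace.go p np l.length l [] := by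
  intro fuel
  induction fuel using Nat.strong_induction_on with
  | _ fuel ih =>
    intro l acc hl
    match fuel, l with
    | 0, [] => simp [PySem.Chars.replace.go]
    | f+1, [] => simp [PySem.Chars.replace.go]
    | f+1, c :: t =>
      have hlen : t.length + 1 ≤ f + 1 := by simpa using hl
      by_cases hpre : p.isPrefixOf (c :: t)
      · have hplen : 1 ≤ p.length := by cases p <;> simp_all
        have hdlen : (List.drop p.length (c :: t)).length ≤ t.length := by
          simp [List.length_drop]; omega
        rw [show (c::t).length = t.length + 1 from by simp]
        simp only [PySem.Chars.replace.go, hpre, if_pos]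
        rw [ih f (by omega) _ (np.reverse ++ acc) (le_trans hdlen (by omega)),
            ih t.length (by omega) _ (np.reverse ++ ([] : List Char)) hdlen]
        simp
      · rw [show (c::t).length = t.length + 1 from by simp]
        simp only [PySem.Chars.replace.go, hpre]
        rw [ih f (by omega) t (c :: acc) (by omega), ih t.length (by omega) t [c] (le_refl _)]
        simp

theorem replace_eq_go (p np l : List Char) (hp : p ≠ []) :
    PySem.Chars.replace l p np = PySem.Chars.replace.go p np l.length l [] := by
  have : p.isEmpty = false := by cases p <;> simp_all
  simp [PySem.Chars.replace, this]

theorem replace_nil (p np : List Char) (hp : p ≠ []) : PySem.Chars.replace [] p np = [] := by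
  rw [replace_eq_go _ _ _ hp]; simp [PySem.Chars.replace.go]

theorem replace_pos (p np : List Char) (c : Char) (t : List Char) (hp : p ≠ [])
    (hpre : p.isPrefixOf (c :: t)) :
    PySem.Chars.replace (c :: t) p np = np ++ PySem.Chars.replace (List.drop p.length (c :: t)) p np := by
  have hplen : 1 ≤ p.length := by cases p <;> simp_all
  have hdlen : (List.drop p.length (c :: t)).length ≤ t.length := by simp [List.length_drop]; omega
  rw [replace_eq_go _ _ _ hp, show (c::t).length = t.length + 1 from by simp]
  simp only [PySem.Chars.replace.go, hpre, if_pos]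
  rw [go_spec p np hp t.length _ _ hdlen, replace_eq_go _ _ _ hp]
  simp

theorem replace_neg (p np : List Char) (c : Char) (t : List Char) (hp : p ≠ [])
    (hpre : ¬ p.isPrefixOf (c :: t)) :
    PySem.Chars.replace (c :: t) p np = c :: PySem.Chars.replace t p np := by
  rw [replace_eq_go _ _ _ hp, show (c::t).length = t.length + 1 from by simp]
  simp only [PySem.Chars.replace.go, hpre]
  rw [go_spec p np hp t.length t [c] (le_refl _), replace_eq_go _ _ _ hp]
  simp

theorem head_replace (p np' l : List Char) (hp : p ≠ []) :
    (PySem.Chars.replace l p ('%' :: np')).head? = some '%' ∨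
    (PySem.Chars.replace l p ('%' :: np')).head? = l.head? := by
  cases l with
  | nil => right; rw [replace_nil _ _ hp]
  | cons c t =>
    by_cases hpre : p.isPrefixOf (c :: t)
    · left; rw [replace_pos _ _ _ _ hp hpre]; simp
    · right; rw [replace_neg _ _ _ _ hp hpre]; simp

theorem head_replace_ne (p np' l : List Char) (hp : p ≠ []) (a : Char) (ha : a ≠ '%')
    (h : l.head? ≠ some a) :
    (PySem.Chars.replace l p ('%' :: np')).head? ≠ some a := by
  rcases head_replace p np' l hp with h' | h' <;> rw [h']
  · simp_all
    exact fun hh => ha hh.symm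
  · simp_all

theorem copy_block (a : Char) (p : List Char) (hp : p.head? = some a) (np : List Char) :
    ∀ blk z : List Char, a ∉ blk →
      PySem.Chars.replace (blk ++ z) p np = blk ++ PySem.Chars.replace z p np := by
  intro blk
  induction blk with
  | nil => simp
  | cons b bs ih =>
    intro z hb
    obtain ⟨p', rfl⟩ : ∃ p', p = a :: p' := by cases p <;> simp_all
    have hne : b ≠ a := by simp_all; tauto
    have : ¬ (a :: p').isPrefixOf (b :: (bs ++ z)) := by simp [List.isPrefixOf]; intro h; exact absurd h.symm hne
    rw [List.cons_append, replace_neg _ _ _ _ (by simp) this, ih z (by simp_all)]; simp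

theorem not_prefix_two (a c : Char) (t : List Char) (h : ¬ (c = a ∧ t.head? = some a)) :
    ¬ ([a,a] : List Char).isPrefixOf (c :: t) := by
  cases t with
  | nil => simp [List.isPrefixOf]
  | cons d r =>
    simp [List.isPrefixOf]
    intro h1 h2
    exact absurd ⟨h1.symm, by simp [h2.symm]⟩ h

theorem copy_two (a x c : Char) (t : List Char) (h : ¬ (c = a ∧ t.head? = some a)) :
    PySem.Chars.replace (c :: t) [a, a] ['%', x] = c :: PySem.Chars.replace t [a, a] ['%', x] :=
  replace_neg _ _ _ _ (by simp) (not_prefix_two a c t h)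

theorem not_prefix_four (c : Char) (z : List Char) (h : ¬ (c = 'y' ∧ z.head? = some 'y')) :
    ¬ (['y','y','y','y'] : List Char).isPrefixOf (c :: z) := by
  cases z with
  | nil => simp [List.isPrefixOf]
  | cons d r =>
    simp [List.isPrefixOf]
    intro h1 h2
    exact absurd ⟨h1.symm, by simp [h2.symm]⟩ h

theorem copy_four (c : Char) (z np : List Char) (h : ¬ (c = 'y' ∧ z.head? = some 'y')) :
    PySem.Chars.replace (c :: z) ['y','y','y','y'] np = c :: PySem.Chars.replace z ['y','y','y','y'] np :=
  replace_neg _ _ _ _ (by simp) (not_prefix_four c z h)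

theorem yy_run (z np : List Char) (hz : z.head? ≠ some 'y') :
    PySem.Chars.replace ('y'::z) ['y','y','y','y'] np = 'y' :: PySem.Chars.replace z ['y','y','y','y'] np :=
  copy_four _ _ _ (by simp_all)

theorem yy_run2 (z np : List Char) (hz : z.head? ≠ some 'y') :
    PySem.Chars.replace ('y'::'y'::z) ['y','y','y','y'] np = 'y'::'y' :: PySem.Chars.replace z ['y','y','y','y'] np := by
  have hpre : ¬ (['y','y','y','y'] : List Char).isPrefixOf ('y'::'y'::z) := by
    cases z with
    | nil => simp [List.isPrefixOf]
    | cons d r => simp [List.isPrefixOf]; intro h1; exact absurd (by simp [h1.symm]) hz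
  rw [replace_neg _ _ _ _ (by simp) hpre, yy_run z np hz]

theorem yy_run3 (z np : List Char) (hz : z.head? ≠ some 'y') :
    PySem.Chars.replace ('y'::'y'::'y'::z) ['y','y','y','y'] np = 'y'::'y'::'y' :: PySem.Chars.replace z ['y','y','y','y'] np := by
  have hpre : ¬ (['y','y','y','y'] : List Char).isPrefixOf ('y'::'y'::'y'::z) := by
    cases z with
    | nil => simp [List.isPrefixOf]
    | cons d r => simp [List.isPrefixOf]; intro h1; exact absurd (by simp [h1.symm]) hz
  rw [replace_neg _ _ _ _ (by simp) hpre, yy_run2 z np hz]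

def pipeChars (l : List Char) : List Char :=
  PySem.Chars.replace
    (PySem.Chars.replace
      (PySem.Chars.replace
        (PySem.Chars.replace
          (PySem.Chars.replace
            (PySem.Chars.replace l ['d','d'] ['%','d'])
            ['m','m'] ['%','m'])
          ['y','y','y','y'] ['%','Y'])
        ['y','y'] ['%','y'])
      ['H','H'] ['%','H'])
    ['M','M'] ['%','M']

theorem pipe_nil : pipeChars [] = [] := by
  simp [pipeChars, replace_nil]

theorem pipe_dd (r : List Char) : pipeChars ('d'::'d'::r) = '%'::'d'::pipeChars r := by
  unfold pipeChars
  rw [replace_pos ['d','d'] ['%','d'] _ _ (by simp) (by simp [List.isPrefixOf])]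
  simp only [List.length_cons, List.length_nil, List.drop_succ_cons, List.drop_zero]
  rw [copy_block 'm' ['m','m'] rfl _ ['%','d'] _ (by simp),
      copy_block 'y' ['y','y','y','y'] rfl _ ['%','d'] _ (by simp),
      copy_block 'y' ['y','y'] rfl _ ['%','d'] _ (by simp),
      copy_block 'H' ['H','H'] rfl _ ['%','d'] _ (by simp),
      copy_block 'M' ['M','M'] rfl _ ['%','d'] _ (by simp)]
  simp

theorem pipe_mm (r : List Char) : pipeChars ('m'::'m'::r) = '%'::'m'::pipeChars r := by
  unfold pipeChars
  rw [show ('m'::'m'::r) = ['m','m'] ++ r from rfl,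
      copy_block 'd' ['d','d'] rfl _ ['m','m'] _ (by simp)]
  rw [show (['m','m'] ++ PySem.Chars.replace r ['d','d'] ['%','d'])
        = 'm'::'m'::PySem.Chars.replace r ['d','d'] ['%','d'] from rfl]
  rw [replace_pos ['m','m'] ['%','m'] _ _ (by simp) (by simp [List.isPrefixOf])]
  simp only [List.length_cons, List.length_nil, List.drop_succ_cons, List.drop_zero]
  rw [copy_block 'y' ['y','y','y','y'] rfl _ ['%','m'] _ (by simp),
      copy_block 'y' ['y','y'] rfl _ ['%','m'] _ (by simp),
      copy_block 'H' ['H','H'] rfl _ ['%','m'] _ (by simp),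
      copy_block 'M' ['M','M'] rfl _ ['%','m'] _ (by simp)]
  simp

theorem pipe_HH (r : List Char) : pipeChars ('H'::'H'::r) = '%'::'H'::pipeChars r := by
  unfold pipeChars
  rw [show ('H'::'H'::r) = ['H','H'] ++ r from rfl,
      copy_block 'd' ['d','d'] rfl _ ['H','H'] _ (by simp),
      copy_block 'm' ['m','m'] rfl _ ['H','H'] _ (by simp),
      copy_block 'y' ['y','y','y','y'] rfl _ ['H','H'] _ (by simp),
      copy_block 'y' ['y','y'] rfl _ ['H','H'] _ (by simp)]
  rw [show ∀ X : List Char, ['H','H'] ++ X = 'H'::'H'::X from fun _ => rfl]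
  rw [replace_pos ['H','H'] ['%','H'] _ _ (by simp) (by simp [List.isPrefixOf])]
  simp only [List.length_cons, List.length_nil, List.drop_succ_cons, List.drop_zero]
  rw [copy_block 'M' ['M','M'] rfl _ ['%','H'] _ (by simp)]
  simp

theorem pipe_MM (r : List Char) : pipeChars ('M'::'M'::r) = '%'::'M'::pipeChars r := by
  unfold pipeChars
  rw [show ('M'::'M'::r) = ['M','M'] ++ r from rfl,
      copy_block 'd' ['d','d'] rfl _ ['M','M'] _ (by simp),
      copy_block 'm' ['m','m'] rfl _ ['M','M'] _ (by simp),
      copy_block 'y' ['y','y','y','y'] rfl _ ['M','M'] _ (by simp),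
      copy_block 'y' ['y','y'] rfl _ ['M','M'] _ (by simp),
      copy_block 'H' ['H','H'] rfl _ ['M','M'] _ (by simp)]
  rw [show ∀ X : List Char, ['M','M'] ++ X = 'M'::'M'::X from fun _ => rfl]
  rw [replace_pos ['M','M'] ['%','M'] _ _ (by simp) (by simp [List.isPrefixOf])]
  simp only [List.length_cons, List.length_nil, List.drop_succ_cons, List.drop_zero]
  simp

theorem pipe_yyyy (r : List Char) : pipeChars ('y'::'y'::'y'::'y'::r) = '%'::'Y'::pipeChars r := by
  unfold pipeChars
  rw [show ('y'::'y'::'y'::'y'::r) = ['y','y','y','y'] ++ r from rfl,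
      copy_block 'd' ['d','d'] rfl _ ['y','y','y','y'] _ (by simp),
      copy_block 'm' ['m','m'] rfl _ ['y','y','y','y'] _ (by simp)]
  rw [show ∀ X : List Char, ['y','y','y','y'] ++ X = 'y'::'y'::'y'::'y'::X from fun _ => rfl]
  rw [replace_pos ['y','y','y','y'] ['%','Y'] _ _ (by simp) (by simp [List.isPrefixOf])]
  simp only [List.length_cons, List.length_nil, List.drop_succ_cons, List.drop_zero]
  rw [copy_block 'y' ['y','y'] rfl _ ['%','Y'] _ (by simp),
      copy_block 'H' ['H','H'] rfl _ ['%','Y'] _ (by simp),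
      copy_block 'M' ['M','M'] rfl _ ['%','Y'] _ (by simp)]
  simp

theorem pipe_yy (r : List Char) (hr : r.head? ≠ some 'y') :
    pipeChars ('y'::'y'::r) = '%'::'y'::pipeChars r := by
  have hz : (PySem.Chars.replace (PySem.Chars.replace r ['d','d'] ['%','d']) ['m','m'] ['%','m']).head? ≠ some 'y' :=
    head_replace_ne ['m','m'] ['m'] _ (by simp) 'y' (by decide)
      (head_replace_ne ['d','d'] ['d'] r (by simp) 'y' (by decide) hr)
  unfold pipeChars
  rw [show ('y'::'y'::r) = ['y','y'] ++ r from rfl,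
      copy_block 'd' ['d','d'] rfl _ ['y','y'] _ (by simp),
      copy_block 'm' ['m','m'] rfl _ ['y','y'] _ (by simp)]
  rw [show ∀ X : List Char, ['y','y'] ++ X = 'y'::'y'::X from fun _ => rfl]
  rw [yy_run2 _ _ hz]
  rw [replace_pos ['y','y'] ['%','y'] _ _ (by simp) (by simp [List.isPrefixOf])]
  simp only [List.length_cons, List.length_nil, List.drop_succ_cons, List.drop_zero]
  rw [copy_block 'H' ['H','H'] rfl _ ['%','y'] _ (by simp),
      copy_block 'M' ['M','M'] rfl _ ['%','y'] _ (by simp)]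
  simp

theorem pipe_yyy (r : List Char) (hr : r.head? ≠ some 'y') :
    pipeChars ('y'::'y'::'y'::r) = '%'::'y'::'y'::pipeChars r := by
  have hz : (PySem.Chars.replace (PySem.Chars.replace r ['d','d'] ['%','d']) ['m','m'] ['%','m']).head? ≠ some 'y' :=
    head_replace_ne ['m','m'] ['m'] _ (by simp) 'y' (by decide)
      (head_replace_ne ['d','d'] ['d'] r (by simp) 'y' (by decide) hr)
  have hw : (PySem.Chars.replace (PySem.Chars.replace (PySem.Chars.replace r ['d','d'] ['%','d']) ['m','m'] ['%','m']) ['y','y','y','y'] ['%','Y']).head? ≠ some 'y' :=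
    head_replace_ne ['y','y','y','y'] ['Y'] _ (by simp) 'y' (by decide) hz
  unfold pipeChars
  rw [show ('y'::'y'::'y'::r) = ['y','y','y'] ++ r from rfl,
      copy_block 'd' ['d','d'] rfl _ ['y','y','y'] _ (by simp),
      copy_block 'm' ['m','m'] rfl _ ['y','y','y'] _ (by simp)]
  rw [show ∀ X : List Char, ['y','y','y'] ++ X = 'y'::'y'::'y'::X from fun _ => rfl]
  rw [yy_run3 _ _ hz]
  rw [replace_pos ['y','y'] ['%','y'] _ _ (by simp) (by simp [List.isPrefixOf])]
  simp only [List.length_cons, List.length_nil, List.drop_succ_cons, List.drop_zero]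
  rw [copy_two 'y' 'y' 'y' _ (by simp [hw])]
  rw [show ∀ X : List Char, (['%','y'] ++ 'y'::X) = ['%','y','y'] ++ X from fun _ => rfl]
  rw [copy_block 'H' ['H','H'] rfl _ ['%','y','y'] _ (by simp),
      copy_block 'M' ['M','M'] rfl _ ['%','y','y'] _ (by simp)]
  simp

theorem pipe_one (c : Char) (t : List Char)
    (hd : ¬ (c = 'd' ∧ t.head? = some 'd'))
    (hm : ¬ (c = 'm' ∧ t.head? = some 'm'))
    (hy : ¬ (c = 'y' ∧ t.head? = some 'y'))
    (hH : ¬ (c = 'H' ∧ t.head? = some 'H'))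
    (hM : ¬ (c = 'M' ∧ t.head? = some 'M')) :
    pipeChars (c :: t) = c :: pipeChars t := by
  have n1 : ∀ a : Char, a ≠ '%' → t.head? ≠ some a →
      (PySem.Chars.replace t ['d','d'] ['%','d']).head? ≠ some a := fun a ha h =>
    head_replace_ne ['d','d'] ['d'] t (by simp) a ha h
  have n2 : ∀ a : Char, a ≠ '%' → t.head? ≠ some a →
      (PySem.Chars.replace (PySem.Chars.replace t ['d','d'] ['%','d']) ['m','m'] ['%','m']).head? ≠ some a := fun a ha h =>
    head_replace_ne ['m','m'] ['m'] _ (by simp) a ha (n1 a ha h)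
  have n3 : ∀ a : Char, a ≠ '%' → t.head? ≠ some a →
      (PySem.Chars.replace (PySem.Chars.replace (PySem.Chars.replace t ['d','d'] ['%','d']) ['m','m'] ['%','m']) ['y','y','y','y'] ['%','Y']).head? ≠ some a := fun a ha h =>
    head_replace_ne ['y','y','y','y'] ['Y'] _ (by simp) a ha (n2 a ha h)
  have n4 : ∀ a : Char, a ≠ '%' → t.head? ≠ some a →
      (PySem.Chars.replace (PySem.Chars.replace (PySem.Chars.replace (PySem.Chars.replace t ['d','d'] ['%','d']) ['m','m'] ['%','m']) ['y','y','y','y'] ['%','Y']) ['y','y'] ['%','y']).head? ≠ some a := fun a ha h =>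
    head_replace_ne ['y','y'] ['y'] _ (by simp) a ha (n3 a ha h)
  have n5 : ∀ a : Char, a ≠ '%' → t.head? ≠ some a →
      (PySem.Chars.replace (PySem.Chars.replace (PySem.Chars.replace (PySem.Chars.replace (PySem.Chars.replace t ['d','d'] ['%','d']) ['m','m'] ['%','m']) ['y','y','y','y'] ['%','Y']) ['y','y'] ['%','y']) ['H','H'] ['%','H']).head? ≠ some a := fun a ha h =>
    head_replace_ne ['H','H'] ['H'] _ (by simp) a ha (n4 a ha h)
  unfold pipeChars
  rw [copy_two 'd' 'd' c t hd]
  rw [copy_two 'm' 'm' c _ (fun hcm => (n1 'm' (by decide) (fun x => hm ⟨hcm.1, x⟩)) hcm.2)]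
  rw [copy_four c _ _ (fun hcy => (n2 'y' (by decide) (fun x => hy ⟨hcy.1, x⟩)) hcy.2)]
  rw [copy_two 'y' 'y' c _ (fun hcy => (n3 'y' (by decide) (fun x => hy ⟨hcy.1, x⟩)) hcy.2)]
  rw [copy_two 'H' 'H' c _ (fun hcH => (n4 'H' (by decide) (fun x => hH ⟨hcH.1, x⟩)) hcH.2)]
  rw [copy_two 'M' 'M' c _ (fun hcM => (n5 'M' (by decide) (fun x => hM ⟨hcM.1, x⟩)) hcM.2)]

theorem pipe_eq_tok : ∀ l : List Char, pipeChars l = tokChars l := by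
  suffices h : ∀ n : Nat, ∀ l : List Char, l.length ≤ n → pipeChars l = tokChars l from
    fun l => h l.length l le_rfl
  intro n
  induction n with
  | zero =>
    intro l hl
    have : l = [] := by cases l <;> simp_all
    subst this
    rw [pipe_nil]; simp [tokChars]
  | succ n ih =>
    intro l hl
    cases l with
    | nil => rw [pipe_nil]; simp [tokChars]
    | cons c t =>
      have hlt : t.length ≤ n := by simpa using hl
      by_cases h4 : (c :: t).take 4 = ['y','y','y','y']
      · rcases t with _ | ⟨a, t1⟩; · simp [List.take] at h4
        rcases t1 with _ | ⟨b, t2⟩; · simp [List.take] at h4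
        rcases t2 with _ | ⟨d, r⟩; · simp [List.take] at h4
        obtain ⟨rfl, rfl, rfl, rfl⟩ : c = 'y' ∧ a = 'y' ∧ b = 'y' ∧ d = 'y' := by
          simpa [List.take] using h4
        rw [pipe_yyyy, show tokChars ('y'::'y'::'y'::'y'::r) = '%'::'Y'::tokChars r from by
          simp [tokChars, List.take]]
        rw [ih r (by simp at hlt; omega)]
      · by_cases hdd : (c :: t).take 2 = ['d','d']
        · rcases t with _ | ⟨a, t1⟩; · simp [List.take] at hdd
          obtain ⟨rfl, rfl⟩ : c = 'd' ∧ a = 'd' := by simpa [List.take] using hdd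
          rw [pipe_dd, show tokChars ('d'::'d'::t1) = '%'::'d'::tokChars t1 from by
            simp [tokChars, List.take]]
          rw [ih t1 (by simp at hlt; omega)]
        · by_cases hmm : (c :: t).take 2 = ['m','m']
          · rcases t with _ | ⟨a, t1⟩; · simp [List.take] at hmm
            obtain ⟨rfl, rfl⟩ : c = 'm' ∧ a = 'm' := by simpa [List.take] using hmm
            rw [pipe_mm, show tokChars ('m'::'m'::t1) = '%'::'m'::tokChars t1 from by
              simp [tokChars, List.take]]
            rw [ih t1 (by simp at hlt; omega)]
          · by_cases hyy : (c :: t).take 2 = ['y','y']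
            · rcases t with _ | ⟨a, t1⟩; · simp [List.take] at hyy
              obtain ⟨rfl, rfl⟩ : c = 'y' ∧ a = 'y' := by simpa [List.take] using hyy
              by_cases hy3 : t1.head? = some 'y'
              · rcases t1 with _ | ⟨b, r⟩; · simp at hy3
                obtain rfl : b = 'y' := by simpa using hy3
                have hr : r.head? ≠ some 'y' := by
                  intro hh
                  apply h4
                  rcases r with _ | ⟨e, r2⟩; · simp at hh
                  obtain rfl : e = 'y' := by simpa using hh
                  simp [List.take]
                rw [pipe_yyy r hr]
                rw [show tokChars ('y'::'y'::'y'::r) = '%'::'y'::tokChars ('y'::r) from by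
                  rw [tokChars]
                  rw [if_neg h4]
                  simp [List.take]]
                rw [show tokChars ('y'::r) = 'y'::tokChars r from by
                  have e1 : r.take 3 ≠ ['y','y','y'] := by cases r <;> simp_all [List.take]
                  have e2 : r.take 1 ≠ ['y'] := by cases r <;> simp_all [List.take]
                  rw [tokChars]
                  simp [List.take, e1, e2]]
                rw [ih r (by simp at hlt; omega)]
              · rw [pipe_yy t1 hy3]
                rw [show tokChars ('y'::'y'::t1) = '%'::'y'::tokChars t1 from by
                  rw [tokChars]
                  rw [if_neg h4]
                  simp [List.take]]
                rw [ih t1 (by simp at hlt; omega)]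
            · by_cases hHH : (c :: t).take 2 = ['H','H']
              · rcases t with _ | ⟨a, t1⟩; · simp [List.take] at hHH
                obtain ⟨rfl, rfl⟩ : c = 'H' ∧ a = 'H' := by simpa [List.take] using hHH
                rw [pipe_HH, show tokChars ('H'::'H'::t1) = '%'::'H'::tokChars t1 from by
                  simp [tokChars, List.take]]
                rw [ih t1 (by simp at hlt; omega)]
              · by_cases hMM : (c :: t).take 2 = ['M','M']
                · rcases t with _ | ⟨a, t1⟩; · simp [List.take] at hMM
                  obtain ⟨rfl, rfl⟩ : c = 'M' ∧ a = 'M' := by simpa [List.take] using hMM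
                  rw [pipe_MM, show tokChars ('M'::'M'::t1) = '%'::'M'::tokChars t1 from by
                    simp [tokChars, List.take]]
                  rw [ih t1 (by simp at hlt; omega)]
                · have pair : ∀ (a0 : Char), (c :: t).take 2 ≠ [a0, a0] → ¬ (c = a0 ∧ t.head? = some a0) := by
                    intro a0 hne hca
                    rcases t with _ | ⟨b, r⟩ <;> simp_all [List.take]
                  have hyc : ¬ (c = 'y' ∧ t.head? = some 'y') := pair 'y' hyy
                  rw [pipe_one c t (pair 'd' hdd) (pair 'm' hmm) hyc (pair 'H' hHH) (pair 'M' hMM)]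
                  rw [show tokChars (c :: t) = c :: tokChars t from by
                    rw [tokChars]
                    rw [if_neg h4, if_neg hdd, if_neg hmm, if_neg hyy, if_neg hHH, if_neg hMM]]
                  rw [ih t hlt]

-- A's foldl of six replace passes, on the character-list side.
theorem A_toList (s : String) : (correct_date_fmt s).toList = pipeChars s.toList := by
  simp [correct_date_fmt, List.foldl, pipeChars]

-- ===== VERDICT (by name: the statement is the Claim_ definition above) =====
theorem correct_date_fmt_spec : Claim_equal_correct_date_fmt := by
  unfold Claim_equal_correct_date_fmt
  intro s _
  unfold Spec_correct_date_fmt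
  apply String.toList_inj.mp
  rw [A_toList, pipe_eq_tok]
  simp [correct_date_fmt_alt]
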